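-- pv_equiv track=rewrite | github.com/Teaching-projects/SOE-ProgAlap1-HF-2020-farkas1070 | 101/main.py | rossz_tippek
-- ===== SOURCE A (Python) =====
-- from typing import Dict, List
--
-- Tippek=List[str]
--
-- def rossz_tippek(szo:str, betuk:Tippek) -> int:
--     """Megadja, hogy hány rossz betűt tippeltünk eddig.
--
--     Args:
--         szo (str): a kitalálandó szó
--         betuk (Tippek): az eddigi betű tippjeink
--
--     Returns:
--         int: a rossz tippek száma
--     """
--     rosszak = 0
--     for i in szo:
--         rossz = True
--         for j in betuk:
--             if j == i:
--                 rossz = False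
--         if rossz:
--             rosszak += 1
--
--     for i in betuk:
--         rossz = True
--         for j in szo:
--             if j == i:
--                 rossz = False
--         if rossz:
--             rosszak += 1
--     return rosszak
-- ===== SOURCE B (Python) =====
-- def rossz_tippek(szo, betuk):
--     """Count wrong guesses: letters of szo never guessed (with multiplicity)
--     plus guesses absent from szo (with multiplicity), via two frequency tables."""
--     c1 = {}
--     for ch in szo:
--         c1[ch] = c1.get(ch, 0) + 1
--     c2 = {}
--     for b in betuk:
--         c2[b] = c2.get(b, 0) + 1
--     rosszak = sum(n for ch, n in c1.items() if ch not in c2)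
--     rosszak += sum(n for b, n in c2.items() if b not in c1)
--     return rosszak
-- ===== Notes on version B (the rewrite author's own statement) =====
-- stated objective: faster
-- what changed: Replaces the quadratic pair of nested membership scans by two frequency dictionaries built in one pass each, then sums multiplicities over the distinct letters of each side that are absent from the other.
import Mathlib
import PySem

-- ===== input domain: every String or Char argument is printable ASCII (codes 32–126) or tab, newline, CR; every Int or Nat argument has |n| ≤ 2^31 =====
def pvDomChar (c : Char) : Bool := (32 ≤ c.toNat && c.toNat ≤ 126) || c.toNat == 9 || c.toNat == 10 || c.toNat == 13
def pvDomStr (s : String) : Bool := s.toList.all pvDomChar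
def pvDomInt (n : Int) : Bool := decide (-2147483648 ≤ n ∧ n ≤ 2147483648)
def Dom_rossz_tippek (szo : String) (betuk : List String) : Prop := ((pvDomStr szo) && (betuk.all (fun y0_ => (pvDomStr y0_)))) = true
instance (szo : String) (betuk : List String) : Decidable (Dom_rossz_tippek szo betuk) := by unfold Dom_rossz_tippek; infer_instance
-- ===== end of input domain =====

-- B replaces A's quadratic nested membership scans by two one-pass frequency dictionaries (faster).

-- ===== PORT A =====
def rossz_tippek (szo : String) (betuk : List String) : Int :=
  let rosszak : Int := szo.toList.foldl (fun rosszak i =>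
      let rossz := betuk.foldl (fun rossz j => if j == String.singleton i then false else rossz) true
      if rossz then rosszak + 1 else rosszak) 0
  betuk.foldl (fun rosszak i =>
      let rossz := szo.toList.foldl (fun rossz j => if String.singleton j == i then false else rossz) true
      if rossz then rosszak + 1 else rosszak) rosszak

-- ===== PORT B =====
def rossz_tippek_alt (szo : String) (betuk : List String) : Int :=
  let c1 := (szo.toList.map (fun c => String.singleton c)).foldl
      (fun d ch => d.insert ch (d.getD ch 0 + 1)) (PySem.Dict.empty : PySem.Dict String Int)
  let c2 := betuk.foldl
      (fun d b => d.insert b (d.getD b 0 + 1)) (PySem.Dict.empty : PySem.Dict String Int)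
  let rosszak : Int := c1.items.foldl (fun acc p => if c2.contains p.1 then acc else acc + p.2) 0
  rosszak + c2.items.foldl (fun acc p => if c1.contains p.1 then acc else acc + p.2) 0

-- ===== PRECONDITION & SPEC =====
def Spec_rossz_tippek (szo : String) (betuk : List String) (out : Int) : Prop := out = rossz_tippek_alt szo betuk
instance (szo : String) (betuk : List String) (out : Int) : Decidable (Spec_rossz_tippek szo betuk out) := by unfold Spec_rossz_tippek; infer_instance

-- ===== CLAIM (what is proved, stated in full; the proofs are below) =====
def Claim_equal_rossz_tippek : Prop := ∀ (szo : String) (betuk : List String), Dom_rossz_tippek szo betuk → Spec_rossz_tippek szo betuk (rossz_tippek szo betuk)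

-- ===== LEMMAS AND PROOFS =====

-- A's inner flag loop ends false exactly when some element satisfies q.
theorem pv_flag_fold {α : Type} (l : List α) (q : α → Bool) (b : Bool) :
    l.foldl (fun r j => if q j then false else r) b = (b && !l.any q) := by
  induction l generalizing b with
  | nil => simp
  | cons x xs ih =>
    simp only [List.foldl_cons, List.any_cons, ih]
    by_cases h : q x <;> simp [h]

-- A's counting loop counts elements satisfying q.
theorem pv_count_fold {α : Type} (l : List α) (q : α → Bool) (a : Int) :
    l.foldl (fun acc i => if q i then acc + 1 else acc) a = a + (l.countP q : Int) := by
  induction l generalizing a with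
  | nil => simp
  | cons x xs ih =>
    simp only [List.foldl_cons, List.countP_cons]
    by_cases h : q x <;> simp [h, ih]
    ring

-- B's summing loop is the sum of the masked multiplicities.
theorem pv_sum_fold (l : List (String × Int)) (p : String → Bool) (a : Int) :
    l.foldl (fun acc kn => if p kn.1 then acc else acc + kn.2) a
      = a + (l.map (fun kn => if p kn.1 then 0 else kn.2)).sum := by
  induction l generalizing a with
  | nil => simp
  | cons x xs ih =>
    simp only [List.foldl_cons, List.map_cons, List.sum_cons]
    by_cases h : p x.1 <;> simp [h, ih]
    ring

theorem pv_if_zero_sum (u : List String) (p : String → Bool) (f : String → Int) :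
    (u.map (fun k => if p k then (0 : Int) else f k)).sum
      = ((u.filter (fun k => !p k)).map f).sum := by
  induction u with
  | nil => simp
  | cons x xs ih => by_cases h : p x <;> simp [h, ih]

-- Summing multiplicities over the distinct elements not satisfying p is countP (¬p).
theorem pv_distinct_sum (xs : List String) (p : String → Bool) :
    ((PySem.Set.ofList xs).map (fun k => if p k then (0 : Int) else (xs.count k : Int))).sum
      = (xs.countP (fun x => !p x) : Int) := by
  have hperm : (PySem.Set.ofList xs).Perm xs.dedup := by
    refine (List.perm_ext_iff_of_nodup (PySem.Set.nodup_ofList xs) xs.nodup_dedup).2 ?_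
    intro a; rw [PySem.Set.mem_ofList, List.mem_dedup]
  rw [(hperm.map _).sum_eq, pv_if_zero_sum]
  have h2 : ((xs.dedup.filter (fun k => !p k)).map (fun k => (xs.count k : Int))).sum
      = (((xs.dedup.filter (fun k => !p k)).map (fun k => xs.count k)).sum : Nat) := by
    rw [Nat.cast_list_sum, List.map_map]; rfl
  rw [h2, List.sum_map_count_dedup_filter_eq_countP]

-- A in closed form: unmatched letters of szo plus unmatched guesses, by multiplicity.
theorem pv_A_eq (szo : String) (betuk : List String) :
    rossz_tippek szo betuk
      = ((szo.toList.map String.singleton).countP (fun s => !betuk.contains s) : Int)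
        + (betuk.countP (fun b => !(szo.toList.map String.singleton).contains b) : Int) := by
  unfold rossz_tippek
  simp only [pv_flag_fold, Bool.true_and]
  rw [pv_count_fold, pv_count_fold, zero_add]
  congr 2
  · rw [List.countP_map]
    apply List.countP_congr
    intro i _
    simp [Function.comp, List.any_beq']
  · apply List.countP_congr
    intro b _
    simp [-List.any_map]

-- B in closed form: the same two counts.
theorem pv_B_eq (szo : String) (betuk : List String) :
    rossz_tippek_alt szo betuk
      = ((szo.toList.map String.singleton).countP (fun s => !betuk.contains s) : Int)
        + (betuk.countP (fun b => !(szo.toList.map String.singleton).contains b) : Int) := by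
  unfold rossz_tippek_alt
  simp only [PySem.Dict.foldl_insert_getD_add_one_eq_counter, PySem.Dict.items_counter,
    PySem.Dict.contains_counter]
  rw [pv_sum_fold, pv_sum_fold, zero_add, List.map_map, List.map_map]
  simp only [Function.comp_def, zero_add]
  rw [pv_distinct_sum, pv_distinct_sum]

-- ===== VERDICT (by name: the statement is the Claim_ definition above) =====
theorem rossz_tippek_spec : Claim_equal_rossz_tippek := by
  intro szo betuk _
  unfold Spec_rossz_tippek
  rw [pv_A_eq, pv_B_eq]
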